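-- pv_equiv track=rewrite | github.com/AIGOJMASON/ai-go-market-analyzer | core/awareness/smi_pattern_posture_reader.py | _derive_posture
-- ===== SOURCE A (Python) =====
-- from typing import Any, Dict, List, Optional
--
-- def _safe_str(value: Any) -> str:
--     return str(value or "").strip()
--
-- def _derive_posture(pattern_signals: List[Dict[str, Any]]) -> str:
--     if not pattern_signals:
--         return "stable"
--
--     pattern_types = {_safe_str(signal.get("pattern_type")) for signal in pattern_signals}
--     severities = {_safe_str(signal.get("severity")) for signal in pattern_signals}
--
--     if "unresolved_pm_queue_present" in pattern_types:
--         return "cautious"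
--
--     if "cold_start" in pattern_types:
--         return "cold_start"
--
--     if "caution" in severities:
--         return "cautious"
--
--     if any(pattern_type.startswith("recurring_") for pattern_type in pattern_types):
--         return "pattern_observed"
--
--     return "stable_observed"
-- ===== SOURCE B (Python) =====
-- from typing import Any, Dict, List
--
-- def _safe_str(value: Any) -> str:
--     return str(value or "").strip()
--
-- _POSTURES = ("stable_observed", "pattern_observed", "cautious", "cold_start", "cautious")
--
-- def _rank(sig: Dict[str, Any]) -> int:
--     t = _safe_str(sig.get("pattern_type"))
--     s = _safe_str(sig.get("severity"))
--     if t == "unresolved_pm_queue_present":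
--         return 4
--     if t == "cold_start":
--         return 3
--     if s == "caution":
--         return 2
--     if t.startswith("recurring_"):
--         return 1
--     return 0
--
-- def _derive_posture(pattern_signals: List[Dict[str, Any]]) -> str:
--     if not pattern_signals:
--         return "stable"
--     return _POSTURES[max(map(_rank, pattern_signals))]
-- ===== Notes on version B (the rewrite author's own statement) =====
-- stated objective: alternative
-- what changed: Each signal is mapped to a numeric severity rank, the maximum rank is taken, and the posture is read from a fixed table indexed by that rank, replacing the construction of two sets of stripped strings probed by a membership/any priority ladder.
import Mathlib
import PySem

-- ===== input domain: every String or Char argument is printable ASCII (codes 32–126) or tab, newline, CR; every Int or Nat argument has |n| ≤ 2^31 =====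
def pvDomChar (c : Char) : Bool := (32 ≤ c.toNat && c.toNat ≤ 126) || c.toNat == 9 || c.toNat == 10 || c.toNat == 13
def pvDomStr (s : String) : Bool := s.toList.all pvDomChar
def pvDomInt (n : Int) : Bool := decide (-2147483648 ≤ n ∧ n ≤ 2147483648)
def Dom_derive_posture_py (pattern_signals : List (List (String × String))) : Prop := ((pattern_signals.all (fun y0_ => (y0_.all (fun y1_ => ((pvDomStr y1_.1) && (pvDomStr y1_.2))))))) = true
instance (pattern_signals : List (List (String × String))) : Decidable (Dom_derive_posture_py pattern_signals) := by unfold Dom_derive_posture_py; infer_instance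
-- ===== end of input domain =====

-- B replaces the two sets and the membership priority ladder by a per-signal numeric
-- severity rank, a global max, and a table lookup; an alternative algorithm of the same cost.

-- ===== PORT A =====
-- _safe_str(value): str(value or "").strip(); value is signal.get(k) : Option String, None → ""
def safe_str_py (value : Option String) : String := PySem.Str.strip (value.getD "")

def derive_posture_py (pattern_signals : List (List (String × String))) : String :=
  if pattern_signals = [] then "stable"
  else
    let pattern_types : PySem.Set String :=
      PySem.Set.ofList (pattern_signals.map (fun signal => safe_str_py (PySem.Dict.get? (PySem.Dict.mk signal) "pattern_type")))
    let severities : PySem.Set String :=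
      PySem.Set.ofList (pattern_signals.map (fun signal => safe_str_py (PySem.Dict.get? (PySem.Dict.mk signal) "severity")))
    if PySem.Set.contains pattern_types "unresolved_pm_queue_present" then "cautious"
    else if PySem.Set.contains pattern_types "cold_start" then "cold_start"
    else if PySem.Set.contains severities "caution" then "cautious"
    else if pattern_types.any (fun pattern_type => PySem.Str.startswith pattern_type "recurring_") then "pattern_observed"
    else "stable_observed"

-- ===== PORT B =====
def postures_py : List String := ["stable_observed", "pattern_observed", "cautious", "cold_start", "cautious"]

def rank_py (signal : List (String × String)) : Nat :=
  let t := safe_str_py (PySem.Dict.get? (PySem.Dict.mk signal) "pattern_type")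
  let s := safe_str_py (PySem.Dict.get? (PySem.Dict.mk signal) "severity")
  if t == "unresolved_pm_queue_present" then 4
  else if t == "cold_start" then 3
  else if s == "caution" then 2
  else if PySem.Str.startswith t "recurring_" then 1
  else 0

def derive_posture_py_alt (pattern_signals : List (List (String × String))) : String :=
  if pattern_signals = [] then "stable"
  else postures_py.getD ((pattern_signals.map rank_py).foldl Nat.max 0) "stable"

-- ===== PRECONDITION & SPEC =====
def Spec_derive_posture_py (pattern_signals : List (List (String × String))) (out : String) : Prop := out = derive_posture_py_alt pattern_signals
instance (pattern_signals : List (List (String × String))) (out : String) : Decidable (Spec_derive_posture_py pattern_signals out) := by unfold Spec_derive_posture_py; infer_instance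

-- ===== CLAIM (what is proved, stated in full; the proofs are below) =====
def Claim_equal_derive_posture_py : Prop := ∀ (pattern_signals : List (List (String × String))), Dom_derive_posture_py pattern_signals → Spec_derive_posture_py pattern_signals (derive_posture_py pattern_signals)

-- ===== LEMMAS AND PROOFS =====

-- membership in set(map f l) is the same as any f-hit in l
theorem contains_ofList_map (l : List (List (String × String)))
    (f : List (String × String) → String) (x : String) :
    PySem.Set.contains (PySem.Set.ofList (l.map f)) x = l.any (fun e => f e == x) := by
  rw [Bool.eq_iff_iff]
  simp only [PySem.Set.contains_iff, PySem.Set.mem_ofList, List.mem_map, List.any_eq_true,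
    beq_iff_eq]

-- any over set(map f l) is any over l
theorem any_ofList_map (l : List (List (String × String)))
    (f : List (String × String) → String) (p : String → Bool) :
    (PySem.Set.ofList (l.map f)).any p = l.any (fun e => p (f e)) := by
  rw [Bool.eq_iff_iff]
  simp only [List.any_eq_true, PySem.Set.mem_ofList, List.mem_map]
  constructor
  · rintro ⟨x, ⟨e, he, rfl⟩, hp⟩; exact ⟨e, he, hp⟩
  · rintro ⟨e, he, hp⟩; exact ⟨f e, ⟨e, he, rfl⟩, hp⟩

theorem foldl_max_init (a : Nat) (l : List Nat) :
    l.foldl Nat.max a = Nat.max a (l.foldl Nat.max 0) := by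
  induction l generalizing a with
  | nil => simp
  | cons x xs ih =>
    simp only [List.foldl_cons]
    rw [ih (Nat.max a x), ih (Nat.max 0 x)]
    simp only [Nat.zero_max]
    exact Nat.max_assoc a x _

theorem rank_le4 (e : List (String × String)) : rank_py e ≤ 4 := by
  simp only [rank_py]; split_ifs <;> omega

theorem fold_le4 (l : List (List (String × String))) :
    (l.map rank_py).foldl Nat.max 0 ≤ 4 := by
  induction l with
  | nil => simp
  | cons x xs ih =>
    simp only [List.map_cons, List.foldl_cons]
    rw [foldl_max_init]
    simp only [Nat.zero_max]
    exact Nat.max_le.mpr ⟨rank_le4 x, ih⟩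

theorem le_fold_max (l : List (List (String × String))) (k : Nat) (hk : 1 ≤ k) :
    k ≤ (l.map rank_py).foldl Nat.max 0 ↔ ∃ e ∈ l, k ≤ rank_py e := by
  induction l with
  | nil => simp; omega
  | cons x xs ih =>
    simp only [List.map_cons, List.foldl_cons]
    rw [foldl_max_init]
    simp only [Nat.zero_max]
    constructor
    · intro hle
      rcases le_max_iff.mp hle with hr | hr
      · exact ⟨x, List.mem_cons_self, hr⟩
      · obtain ⟨e, he, hr'⟩ := ih.mp hr
        exact ⟨e, List.mem_cons_of_mem _ he, hr'⟩
    · rintro ⟨e, he, hr⟩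
      rcases List.mem_cons.mp he with rfl | he'
      · exact le_max_iff.mpr (Or.inl hr)
      · exact le_max_iff.mpr (Or.inr (ih.mpr ⟨e, he', hr⟩))

-- rank level characterisations
theorem rank4_iff (e : List (String × String)) :
    4 ≤ rank_py e ↔ (safe_str_py (PySem.Dict.get? (PySem.Dict.mk e) "pattern_type") == "unresolved_pm_queue_present") = true := by
  simp only [rank_py]; split_ifs <;> simp_all

theorem rank3_iff (e : List (String × String)) :
    3 ≤ rank_py e ↔ ((safe_str_py (PySem.Dict.get? (PySem.Dict.mk e) "pattern_type") == "unresolved_pm_queue_present") = true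
      ∨ (safe_str_py (PySem.Dict.get? (PySem.Dict.mk e) "pattern_type") == "cold_start") = true) := by
  simp only [rank_py]; split_ifs <;> simp_all

theorem rank2_iff (e : List (String × String)) :
    2 ≤ rank_py e ↔ ((safe_str_py (PySem.Dict.get? (PySem.Dict.mk e) "pattern_type") == "unresolved_pm_queue_present") = true
      ∨ (safe_str_py (PySem.Dict.get? (PySem.Dict.mk e) "pattern_type") == "cold_start") = true
      ∨ (safe_str_py (PySem.Dict.get? (PySem.Dict.mk e) "severity") == "caution") = true) := by
  simp only [rank_py]; split_ifs <;> simp_all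

theorem rank1_iff (e : List (String × String)) :
    1 ≤ rank_py e ↔ ((safe_str_py (PySem.Dict.get? (PySem.Dict.mk e) "pattern_type") == "unresolved_pm_queue_present") = true
      ∨ (safe_str_py (PySem.Dict.get? (PySem.Dict.mk e) "pattern_type") == "cold_start") = true
      ∨ (safe_str_py (PySem.Dict.get? (PySem.Dict.mk e) "severity") == "caution") = true
      ∨ PySem.Str.startswith (safe_str_py (PySem.Dict.get? (PySem.Dict.mk e) "pattern_type")) "recurring_" = true) := by
  simp only [rank_py]; split_ifs <;> simp_all

-- ===== VERDICT (by name: the statement is the Claim_ definition above) =====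
theorem derive_posture_py_spec : Claim_equal_derive_posture_py := by
  intro ps _
  unfold Spec_derive_posture_py derive_posture_py derive_posture_py_alt
  by_cases h : ps = []
  · simp [h]
  · simp only [if_neg h, contains_ofList_map, any_ofList_map]
    have h4 : (ps.map rank_py).foldl Nat.max 0 ≤ 4 := fold_le4 ps
    by_cases H1 : (ps.any (fun e => safe_str_py (PySem.Dict.get? (PySem.Dict.mk e) "pattern_type") == "unresolved_pm_queue_present")) = true
    · have hlb : 4 ≤ (ps.map rank_py).foldl Nat.max 0 := by
        rw [le_fold_max ps 4 (by omega)]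
        obtain ⟨e, he, hp⟩ := List.any_eq_true.mp H1
        exact ⟨e, he, (rank4_iff e).mpr hp⟩
      have hm : (ps.map rank_py).foldl Nat.max 0 = 4 := by omega
      rw [if_pos H1, hm]; rfl
    · have hub4 : ¬ 4 ≤ (ps.map rank_py).foldl Nat.max 0 := by
        rw [le_fold_max ps 4 (by omega)]
        rintro ⟨e, he, hr⟩
        exact H1 (List.any_eq_true.mpr ⟨e, he, (rank4_iff e).mp hr⟩)
      by_cases H2 : (ps.any (fun e => safe_str_py (PySem.Dict.get? (PySem.Dict.mk e) "pattern_type") == "cold_start")) = true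
      · have hlb : 3 ≤ (ps.map rank_py).foldl Nat.max 0 := by
          rw [le_fold_max ps 3 (by omega)]
          obtain ⟨e, he, hp⟩ := List.any_eq_true.mp H2
          exact ⟨e, he, (rank3_iff e).mpr (Or.inr hp)⟩
        have hm : (ps.map rank_py).foldl Nat.max 0 = 3 := by omega
        rw [if_neg H1, if_pos H2, hm]; rfl
      · have hub3 : ¬ 3 ≤ (ps.map rank_py).foldl Nat.max 0 := by
          rw [le_fold_max ps 3 (by omega)]
          rintro ⟨e, he, hr⟩
          rcases (rank3_iff e).mp hr with hp | hp
          · exact H1 (List.any_eq_true.mpr ⟨e, he, hp⟩)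
          · exact H2 (List.any_eq_true.mpr ⟨e, he, hp⟩)
        by_cases H3 : (ps.any (fun e => safe_str_py (PySem.Dict.get? (PySem.Dict.mk e) "severity") == "caution")) = true
        · have hlb : 2 ≤ (ps.map rank_py).foldl Nat.max 0 := by
            rw [le_fold_max ps 2 (by omega)]
            obtain ⟨e, he, hp⟩ := List.any_eq_true.mp H3
            exact ⟨e, he, (rank2_iff e).mpr (Or.inr (Or.inr hp))⟩
          have hm : (ps.map rank_py).foldl Nat.max 0 = 2 := by omega
          rw [if_neg H1, if_neg H2, if_pos H3, hm]; rfl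
        · have hub2 : ¬ 2 ≤ (ps.map rank_py).foldl Nat.max 0 := by
            rw [le_fold_max ps 2 (by omega)]
            rintro ⟨e, he, hr⟩
            rcases (rank2_iff e).mp hr with hp | hp | hp
            · exact H1 (List.any_eq_true.mpr ⟨e, he, hp⟩)
            · exact H2 (List.any_eq_true.mpr ⟨e, he, hp⟩)
            · exact H3 (List.any_eq_true.mpr ⟨e, he, hp⟩)
          by_cases H4 : (ps.any (fun e => PySem.Str.startswith (safe_str_py (PySem.Dict.get? (PySem.Dict.mk e) "pattern_type")) "recurring_")) = true
          · have hlb : 1 ≤ (ps.map rank_py).foldl Nat.max 0 := by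
              rw [le_fold_max ps 1 (by omega)]
              obtain ⟨e, he, hp⟩ := List.any_eq_true.mp H4
              exact ⟨e, he, (rank1_iff e).mpr (Or.inr (Or.inr (Or.inr hp)))⟩
            have hm : (ps.map rank_py).foldl Nat.max 0 = 1 := by omega
            rw [if_neg H1, if_neg H2, if_neg H3, if_pos H4, hm]; rfl
          · have hub1 : ¬ 1 ≤ (ps.map rank_py).foldl Nat.max 0 := by
              rw [le_fold_max ps 1 (by omega)]
              rintro ⟨e, he, hr⟩
              rcases (rank1_iff e).mp hr with hp | hp | hp | hp
              · exact H1 (List.any_eq_true.mpr ⟨e, he, hp⟩)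
              · exact H2 (List.any_eq_true.mpr ⟨e, he, hp⟩)
              · exact H3 (List.any_eq_true.mpr ⟨e, he, hp⟩)
              · exact H4 (List.any_eq_true.mpr ⟨e, he, hp⟩)
            have hm : (ps.map rank_py).foldl Nat.max 0 = 0 := by omega
            rw [if_neg H1, if_neg H2, if_neg H3, if_neg H4, hm]; rfl
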